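-- pv_equiv track=rewrite | github.com/manoloriveros/audio-processor | main.py | _detect_key
-- ===== SOURCE A (Python) =====
-- NOTES = ["C", "C#", "D", "D#", "E", "F", "F#", "G", "G#", "A", "A#", "B"]
--
-- def _detect_key(chord_names: list[str]) -> tuple[str, str]:
--     """Detecta la tonalidad mas probable a partir de la frecuencia de acordes."""
--     if not chord_names:
--         return "C", "major"
--
--     # Normalizar: "Am7" -> "Am", "G7" -> "G", "Cmaj7" -> "C", etc.
--     freq: dict[str, int] = {}
--     for name in chord_names:
--         # Extraer solo root + m/dim para el analisis de tonalidad
--         base = name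
--         for suffix in ("maj7", "m7", "7", "sus4", "sus2", "dim"):
--             if base.endswith(suffix):
--                 base = base[: -len(suffix)]
--                 if suffix in ("m7",):
--                     base += "m"
--                 elif suffix == "dim":
--                     base += "dim"
--                 break
--         if not base:
--             base = name
--         freq[base] = freq.get(base, 0) + 1
--
--     major_intervals = [0, 2, 4, 5, 7, 9, 11]
--     minor_intervals = [0, 2, 3, 5, 7, 8, 10]
--     major_qualities = ["", "m", "m", "", "", "m", "dim"]
--     minor_qualities = ["m", "dim", "", "m", "m", "", ""]
--
--     best_key = "C"
--     best_type = "major"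
--     best_score = -1
--
--     for i, note in enumerate(NOTES):
--         diatonic = [NOTES[(i + iv) % 12] + major_qualities[j] for j, iv in enumerate(major_intervals)]
--         score = sum(freq.get(c, 0) for c in diatonic)
--         if score > best_score:
--             best_score = score
--             best_key = note
--             best_type = "major"
--
--         diatonic = [NOTES[(i + iv) % 12] + minor_qualities[j] for j, iv in enumerate(minor_intervals)]
--         score = sum(freq.get(c, 0) for c in diatonic)
--         if score > best_score:
--             best_score = score
--             best_key = note
--             best_type = "minor"
--
--     return best_key, best_type
-- ===== SOURCE B (Python) =====
-- NOTES = ["C", "C#", "D", "D#", "E", "F", "F#", "G", "G#", "A", "A#", "B"]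
--
-- # Key index convention: key 2*i = (NOTES[i], major), key 2*i+1 = (NOTES[i], minor).
-- _MAJOR_STEPS = [(0, ""), (2, "m"), (4, "m"), (5, ""), (7, ""), (9, "m"), (11, "dim")]
-- _MINOR_STEPS = [(0, "m"), (2, "dim"), (3, ""), (5, "m"), (7, "m"), (8, ""), (10, "")]
--
--
-- def _key_chords(k):
--     steps = _MAJOR_STEPS if k % 2 == 0 else _MINOR_STEPS
--     return [NOTES[(k // 2 + iv) % 12] + q for iv, q in steps]
--
--
-- # chord string -> list of key indices whose diatonic set contains it, built once.
-- _PAIRS = [(c, k) for k in range(24) for c in _key_chords(k)]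
-- _CANDIDATES = {}
-- for _c, _k in _PAIRS:
--     _CANDIDATES.setdefault(_c, []).append(_k)
--
--
-- def _normalize(name):
--     base = name
--     for suffix in ("maj7", "m7", "7", "sus4", "sus2", "dim"):
--         if base.endswith(suffix):
--             base = base[: -len(suffix)]
--             if suffix == "m7":
--                 base += "m"
--             elif suffix == "dim":
--                 base += "dim"
--             break
--     return base if base else name
--
--
-- def _detect_key(chord_names):
--     if not chord_names:
--         return "C", "major"
--     tally = {}
--     for name in chord_names:
--         for k in _CANDIDATES.get(_normalize(name), []):
--             tally[k] = tally.get(k, 0) + 1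
--     best = 0
--     best_score = tally.get(0, 0)
--     for k in range(1, 24):
--         s = tally.get(k, 0)
--         if s > best_score:
--             best, best_score = k, s
--     return NOTES[best // 2], ("major" if best % 2 == 0 else "minor")
-- ===== Notes on version B (the rewrite author's own statement) =====
-- stated objective: alternative
-- what changed: Replaces A's frequency dict plus per-key summation over each of the 24 diatonic chord sets by a precomputed inverted index (chord -> candidate key indices), a single tallying pass over the input chords, and a first-maximum scan over the 24 key indices in canonical order.
import Mathlib
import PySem

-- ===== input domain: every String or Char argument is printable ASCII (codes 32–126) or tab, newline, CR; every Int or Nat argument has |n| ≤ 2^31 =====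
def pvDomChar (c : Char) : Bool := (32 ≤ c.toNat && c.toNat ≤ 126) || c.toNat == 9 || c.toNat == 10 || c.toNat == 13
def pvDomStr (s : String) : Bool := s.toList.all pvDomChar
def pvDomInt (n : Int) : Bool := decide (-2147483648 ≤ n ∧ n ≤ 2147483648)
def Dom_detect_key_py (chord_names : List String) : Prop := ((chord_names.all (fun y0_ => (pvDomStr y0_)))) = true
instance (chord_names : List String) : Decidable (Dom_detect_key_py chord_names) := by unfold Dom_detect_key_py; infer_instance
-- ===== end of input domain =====

-- B replaces A's freq-dict + per-key summation over the 24 diatonic sets by a precomputed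
-- inverted index (chord -> candidate key indices), one tallying pass over the chords, and a
-- first-maximum scan over the 24 key indices (alternative algorithm, same cost class).


-- ===== PORT A =====
def notesPy : List String := ["C", "C#", "D", "D#", "E", "F", "F#", "G", "G#", "A", "A#", "B"]

def suffixesPy : List String := ["maj7", "m7", "7", "sus4", "sus2", "dim"]

-- A's normalisation for-loop with break, step for step over the suffix tuple
def baseLoopA : String → List String → String
  | base, [] => base
  | base, suffix :: rest =>
    if PySem.Str.endswith base suffix then
      let b := PySem.Str.slice base none (some (-(PySem.Str.len suffix)))
      if suffix = "m7" then b ++ "m"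
      else if suffix = "dim" then b ++ "dim"
      else b
    else baseLoopA base rest

def normA (name : String) : String :=
  let base := baseLoopA name suffixesPy
  if base = "" then name else base

def freqA (chord_names : List String) : PySem.Dict String Int :=
  chord_names.foldl (fun freq name =>
    let base := normA name
    freq.insert base (freq.getD base 0 + 1)) PySem.Dict.empty

def majorIntervalsA : List Int := [0, 2, 4, 5, 7, 9, 11]
def minorIntervalsA : List Int := [0, 2, 3, 5, 7, 8, 10]
def majorQualitiesA : List String := ["", "m", "m", "", "", "m", "dim"]
def minorQualitiesA : List String := ["m", "dim", "", "m", "m", "", ""]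

-- the body of A's `for i, note in enumerate(NOTES)` loop
def aKeyStep (freq : PySem.Dict String Int) (st : String × String × Int) (p : Int × String) :
    String × String × Int :=
    let i := p.1
    let note := p.2
    let diatonic := (PySem.List.enumerate majorIntervalsA 0).map (fun q =>
      PySem.List.pyGetD notesPy (PySem.Int.mod (i + q.2) 12) "" ++ PySem.List.pyGetD majorQualitiesA q.1 "")
    let score := (diatonic.map (fun c => freq.getD c 0)).sum
    let st := if score > st.2.2 then (note, "major", score) else st
    let diatonic2 := (PySem.List.enumerate minorIntervalsA 0).map (fun q =>
      PySem.List.pyGetD notesPy (PySem.Int.mod (i + q.2) 12) "" ++ PySem.List.pyGetD minorQualitiesA q.1 "")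
    let score2 := (diatonic2.map (fun c => freq.getD c 0)).sum
    if score2 > st.2.2 then (note, "minor", score2) else st

def keyLoopA (freq : PySem.Dict String Int) : String × String × Int :=
  (PySem.List.enumerate notesPy 0).foldl (aKeyStep freq) ("C", "major", -1)

def detect_key_py (chord_names : List String) : String × String :=
  if chord_names = [] then ("C", "major")
  else
    let st := keyLoopA (freqA chord_names)
    (st.1, st.2.1)

-- ===== PORT B =====
def majorStepsB : List (Int × String) := [(0, ""), (2, "m"), (4, "m"), (5, ""), (7, ""), (9, "m"), (11, "dim")]
def minorStepsB : List (Int × String) := [(0, "m"), (2, "dim"), (3, ""), (5, "m"), (7, "m"), (8, ""), (10, "")]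

def keyChordsB (k : Int) : List String :=
  let steps := if PySem.Int.mod k 2 = 0 then majorStepsB else minorStepsB
  steps.map (fun p => PySem.List.pyGetD notesPy (PySem.Int.mod (PySem.Int.floordiv k 2 + p.1) 12) "" ++ p.2)

def pairsB : List (String × Int) :=
  (PySem.List.pyRange 0 24).flatMap (fun k => (keyChordsB k).map (fun c => (c, k)))

def candidatesB : PySem.Dict String (List Int) :=
  pairsB.foldl (fun d p => d.modify p.1 [] (fun x => x ++ [p.2])) PySem.Dict.empty

-- B's normalisation helper (same suffix loop as A's inline code)
def baseLoopB : String → List String → String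
  | base, [] => base
  | base, suffix :: rest =>
    if PySem.Str.endswith base suffix then
      let b := PySem.Str.slice base none (some (-(PySem.Str.len suffix)))
      if suffix = "m7" then b ++ "m"
      else if suffix = "dim" then b ++ "dim"
      else b
    else baseLoopB base rest

def normB (name : String) : String :=
  let base := baseLoopB name suffixesPy
  if base = "" then name else base

def tallyB (chord_names : List String) : PySem.Dict Int Int :=
  chord_names.foldl (fun t name =>
    (candidatesB.getD (normB name) []).foldl (fun t k => t.insert k (t.getD k 0 + 1)) t) PySem.Dict.empty

def bestB (t : PySem.Dict Int Int) : Int × Int :=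
  (PySem.List.pyRange 1 24).foldl (fun b k =>
    let s := t.getD k 0
    if s > b.2 then (k, s) else b) (0, t.getD 0 0)

def detect_key_py_alt (chord_names : List String) : String × String :=
  if chord_names = [] then ("C", "major")
  else
    let b := bestB (tallyB chord_names)
    (PySem.List.pyGetD notesPy (PySem.Int.floordiv b.1 2) "",
     if PySem.Int.mod b.1 2 = 0 then "major" else "minor")

-- ===== PRECONDITION & SPEC =====
def Spec_detect_key_py (chord_names : List String) (out : String × String) : Prop := out = detect_key_py_alt chord_names
instance (chord_names : List String) (out : String × String) : Decidable (Spec_detect_key_py chord_names out) := by unfold Spec_detect_key_py; infer_instance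

-- ===== CLAIM (what is proved, stated in full; the proofs are below) =====
def Claim_equal_detect_key_py : Prop := ∀ (chord_names : List String), Dom_detect_key_py chord_names → Spec_detect_key_py chord_names (detect_key_py chord_names)

-- ===== LEMMAS AND PROOFS =====

-- decode a key index (0..23) into (note, mode), the way B's final line does
def decodeK (k : Int) : String × String :=
  (PySem.List.pyGetD notesPy (PySem.Int.floordiv k 2) "",
   if PySem.Int.mod k 2 = 0 then "major" else "minor")

def stepA (s : Int → Int) (st : String × String × Int) (k : Int) : String × String × Int :=
  if s k > st.2.2 then ((decodeK k).1, (decodeK k).2, s k) else st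

def stepB (s : Int → Int) (b : Int × Int) (k : Int) : Int × Int :=
  if s k > b.2 then (k, s k) else b

-- A's score of key index k, read off freq; B's score of key index k, as a count over the input
def scoreA (freq : PySem.Dict String Int) (k : Int) : Int :=
  ((keyChordsB k).map (fun c => freq.getD c 0)).sum

def scB (chords : List String) (k : Int) : Int :=
  (chords.countP (fun n => decide (normA n ∈ keyChordsB k)) : Int)

theorem normB_eq_normA (n : String) : normB n = normA n := by
  have h : baseLoopB n suffixesPy = baseLoopA n suffixesPy := by
    simp [suffixesPy, baseLoopA, baseLoopB]
  simp [normA, normB, h]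

theorem nodup_keyChords : ∀ k ∈ PySem.List.pyRange 0 24, (keyChordsB k).Nodup := by decide

theorem step_pair (freq : PySem.Dict String Int) (st : String × String × Int) :
    ∀ p ∈ PySem.List.enumerate notesPy 0,
      aKeyStep freq st p = stepA (scoreA freq) (stepA (scoreA freq) st (2 * p.1)) (2 * p.1 + 1) := by
  intro p hp
  fin_cases hp <;> rfl

theorem range24_flat :
    PySem.List.pyRange 0 24 = (PySem.List.enumerate notesPy 0).flatMap (fun p => [2 * p.1, 2 * p.1 + 1]) := by
  decide

theorem foldA_eq (freq : PySem.Dict String Int) :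
    keyLoopA freq = (PySem.List.pyRange 0 24).foldl (stepA (scoreA freq)) ("C", "major", -1) := by
  rw [keyLoopA, range24_flat, List.foldl_flatMap]
  apply PySem.List.foldl_congr_mem
  intro acc p hp
  rw [step_pair freq acc p hp]
  rfl

theorem foldAB (s : Int → Int) : ∀ (L : List Int) (b : Int × Int),
    L.foldl (stepA s) ((decodeK b.1).1, (decodeK b.1).2, b.2)
      = ((decodeK (L.foldl (stepB s) b).1).1, (decodeK (L.foldl (stepB s) b).1).2,
         (L.foldl (stepB s) b).2) := by
  intro L
  induction L with
  | nil => intro b; rfl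
  | cons k L ih =>
    intro b
    simp only [List.foldl_cons]
    have h : stepA s ((decodeK b.1).1, (decodeK b.1).2, b.2) k
        = ((decodeK (stepB s b k).1).1, (decodeK (stepB s b k).1).2, (stepB s b k).2) := by
      simp only [stepA, stepB]
      by_cases hc : s k > b.2
      · simp [hc]
      · simp [hc]
    rw [h, ih]

theorem freqA_getD (chords : List String) (c : String) :
    (freqA chords).getD c 0 = ((chords.map normA).count c : Int) := by
  have h : freqA chords
      = (chords.map normA).foldl (fun d x => d.insert x (d.getD x 0 + 1)) PySem.Dict.empty := by
    rw [freqA, List.foldl_map]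
  rw [h, PySem.Dict.getD_foldl_insert_add_one, PySem.Dict.getD_empty]
  simp

theorem countP_disj {α : Type} (l : List α) (p q : α → Bool)
    (h : ∀ x ∈ l, ¬(p x = true ∧ q x = true)) :
    l.countP (fun x => p x || q x) = l.countP p + l.countP q := by
  induction l with
  | nil => simp
  | cons a l ih =>
    have ha := h a (by simp)
    have ih' := ih (fun x hx => h x (by simp [hx]))
    by_cases hp : p a = true <;> by_cases hq : q a = true
    · exact absurd ⟨hp, hq⟩ ha
    all_goals simp [hp, hq, ih'] <;> omega

theorem sum_counts (D : List String) (hD : D.Nodup) (l : List String) :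
    (D.map (fun c => ((l.count c : Nat) : Int))).sum = (l.countP (fun x => decide (x ∈ D)) : Int) := by
  induction D with
  | nil => simp
  | cons a D ih =>
    have hna : a ∉ D := (List.nodup_cons.mp hD).1
    have ih' := ih (List.nodup_cons.mp hD).2
    have hcongr : l.countP (fun x => decide (x ∈ a :: D))
        = l.countP (fun x => (x == a) || decide (x ∈ D)) := by
      apply List.countP_congr
      intro x _
      simp [List.mem_cons]
    have hdisj : l.countP (fun x => (x == a) || decide (x ∈ D))
        = l.countP (fun x => x == a) + l.countP (fun x => decide (x ∈ D)) := by
      apply countP_disj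
      intro x _ ⟨h1, h2⟩
      exact hna (by simpa using (beq_iff_eq.mp h1) ▸ (by simpa using h2))
    have hcount : l.countP (fun x => x == a) = l.count a := rfl
    simp only [List.map_cons, List.sum_cons, ih', hcongr, hdisj, hcount]
    push_cast
    ring

theorem scoreA_eq (chords : List String) (k : Int) (hk : k ∈ PySem.List.pyRange 0 24) :
    scoreA (freqA chords) k = scB chords k := by
  have hD := nodup_keyChords k hk
  rw [scoreA, List.map_congr_left (fun c _ => freqA_getD chords c)]
  rw [sum_counts _ hD, scB, List.countP_map]
  rfl

theorem flatpairs (c : String) : ∀ (L : List Int), (∀ k ∈ L, (keyChordsB k).Nodup) →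
    (((L.flatMap (fun k => (keyChordsB k).map (fun c' => (c', k)))).filter
        (fun p => p.1 == c)).map (fun p => p.2))
      = L.filter (fun k => decide (c ∈ keyChordsB k)) := by
  intro L
  induction L with
  | nil => intro _; rfl
  | cons k L ih =>
    intro h
    have hk := h k (by simp)
    have ih' := ih (fun j hj => h j (by simp [hj]))
    simp only [List.flatMap_cons, List.filter_append, List.map_append, ih']
    have hinner : (((keyChordsB k).map (fun c' => (c', k))).filter (fun p => p.1 == c)).map
        (fun p => p.2) = if c ∈ keyChordsB k then [k] else [] := by
      rw [List.filter_map]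
      have heq : ((keyChordsB k).filter ((fun p => p.1 == c) ∘ (fun c' => (c', k))))
          = (keyChordsB k).filter (fun c' => c' == c) := rfl
      rw [heq, List.filter_beq, List.map_map]
      by_cases hc : c ∈ keyChordsB k
      · rw [List.count_eq_one_of_mem hk hc]; simp [hc]
      · rw [List.count_eq_zero.mpr hc]; simp [hc]
    rw [hinner, List.filter_cons]
    by_cases hc : c ∈ keyChordsB k <;> simp [hc]

theorem cand_eq (c : String) :
    candidatesB.getD c [] = (PySem.List.pyRange 0 24).filter (fun k => decide (c ∈ keyChordsB k)) := by
  rw [candidatesB, pairsB, PySem.Dict.getD_foldl_modify_append, PySem.Dict.getD_empty]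
  simpa using flatpairs c (PySem.List.pyRange 0 24) nodup_keyChords

theorem tallyB_getD (chords : List String) (j : Int) (hj : j ∈ PySem.List.pyRange 0 24) :
    (tallyB chords).getD j 0 = scB chords j := by
  have key : ∀ (l : List String) (d : PySem.Dict Int Int),
      (l.foldl (fun t name =>
        (candidatesB.getD (normB name) []).foldl (fun t k => t.insert k (t.getD k 0 + 1)) t) d).getD j 0
      = d.getD j 0 + scB l j := by
    intro l
    induction l with
    | nil => intro d; simp [scB]
    | cons name l ih =>
      intro d
      simp only [List.foldl_cons, ih]
      rw [PySem.Dict.getD_foldl_insert_add_one, cand_eq]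
      have hnodup : ((PySem.List.pyRange 0 24).filter
          (fun k => decide (normB name ∈ keyChordsB k))).Nodup :=
        (by decide : (PySem.List.pyRange 0 24).Nodup).filter _
      have hmem : j ∈ (PySem.List.pyRange 0 24).filter (fun k => decide (normB name ∈ keyChordsB k))
          ↔ normA name ∈ keyChordsB j := by
        simp [List.mem_filter, hj, normB_eq_normA]
      have hcnt : (((PySem.List.pyRange 0 24).filter
          (fun k => decide (normB name ∈ keyChordsB k))).count j : Int)
          = if normA name ∈ keyChordsB j then 1 else 0 := by
        by_cases hc : normA name ∈ keyChordsB j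
        · rw [List.count_eq_one_of_mem hnodup (hmem.mpr hc)]; simp [hc]
        · rw [List.count_eq_zero.mpr (fun hm => hc (hmem.mp hm))]; simp [hc]
      rw [hcnt]
      simp only [scB, List.countP_cons]
      by_cases hc : normA name ∈ keyChordsB j <;> simp [hc] <;> omega
  rw [tallyB, key, PySem.Dict.getD_empty, zero_add]

-- ===== VERDICT (by name: the statement is the Claim_ definition above) =====
theorem detect_key_py_spec : Claim_equal_detect_key_py := by
  intro chords _
  unfold Spec_detect_key_py
  by_cases h : chords = []
  · simp [detect_key_py, detect_key_py_alt, h]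
  · simp only [detect_key_py, detect_key_py_alt, if_neg h]
    rw [foldA_eq]
    have hcong : (PySem.List.pyRange 0 24).foldl (stepA (scoreA (freqA chords))) ("C", "major", -1)
        = (PySem.List.pyRange 0 24).foldl (stepA (fun k => (tallyB chords).getD k 0)) ("C", "major", -1) := by
      apply PySem.List.foldl_congr_mem
      intro acc k hk
      simp only [stepA, scoreA_eq chords k hk, tallyB_getD chords k hk]
    rw [hcong]
    have h024 : PySem.List.pyRange 0 24 = 0 :: PySem.List.pyRange 1 24 :=
      PySem.List.pyRange_one_cons (by norm_num)
    rw [h024, List.foldl_cons]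
    have h0 : (0 : Int) ≤ (tallyB chords).getD 0 0 := by
      rw [tallyB_getD chords 0 (by decide)]
      exact Int.natCast_nonneg _
    have hstep0 : stepA (fun k => (tallyB chords).getD k 0) ("C", "major", -1) 0
        = ((decodeK (0, (tallyB chords).getD 0 0).1).1, (decodeK (0, (tallyB chords).getD 0 0).1).2,
           (0, (tallyB chords).getD 0 0).2) := by
      simp only [stepA]
      rw [if_pos (show (tallyB chords).getD 0 0 > ((("C", "major", -1) : String × String × Int)).2.2 by
        simp only []
        omega)]
    rw [hstep0, foldAB]
    rfl
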